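-- pv_equiv track=rewrite | github.com/kelhad00/CBA-toolkit | IBPY_files/interaction_analysis.py | get_next_n_exp
-- ===== SOURCE A (Python) =====
-- def get_next_n_exp(lst, n, max_dist, append_none=True):
--     """return lists of n labels following each different label in a list.
--
--     Args:
--         lst (list of tuples): list of type [(start, stop, label)]
--         n (int): number of elements.
--         max_dist (int): maximum distance between elements, in number of elements.
--                         After this distance, labels are not considered following the current one,
--         append_none (bool, optional): fill with None if no more following label. Defaults to True.
--
--     Returns:
--         dict: {label: [followinglabels]}
--     """
--     dct = {}
--     for l in range(len(lst) - n):  # skip the last n elements (cannot assume they are None)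
--         lab = lst[l][2]
--         if lab not in dct:
--             dct[lab] = []
--         temp = []
--         for ind_next in range(1, n + 1):
--             next_close = lst[l + ind_next - 1][1]
--             next_far = lst[l + ind_next][0]
--             if (next_far - next_close) <= max_dist:
--                 temp.append(lst[l + ind_next][2])
--             else:
--                 if append_none:
--                     temp.extend([None] * (n - ind_next + 1))
--                 break
--         if len(temp) == n:
--             dct[lab].append(temp)
--     return dct
-- ===== SOURCE B (Python) =====
-- def get_next_n_exp(lst, n, max_dist, append_none=True):
--     """Same result as A: {label: lists of the n labels following each occurrence,
--     None-padded (if append_none) when the chain of close-enough neighbours stops early}."""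
--     m = len(lst)
--     # reach[i] = how many consecutive following elements are within max_dist of their predecessor
--     reach = [0] * m
--     for i in range(m - 2, -1, -1):
--         if lst[i + 1][0] - lst[i][1] <= max_dist:
--             reach[i] = reach[i + 1] + 1
--     dct = {}
--     for l in range(m - n):
--         rows = dct.setdefault(lst[l][2], [])
--         valid = min(reach[l], n)
--         if valid == n or append_none:
--             rows.append([lst[l + 1 + j][2] for j in range(valid)] + [None] * (n - valid))
--     return dct
-- ===== Notes on version B (the rewrite author's own statement) =====
-- stated objective: alternative
-- what changed: Replaces A's per-position inner break-loop over the next n elements by a single reverse-scan run-length array reach[i] of within-distance gaps, so each result row is computed as a slice of reach[l] labels plus None padding instead of re-walking and re-comparing the gaps.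
import Mathlib
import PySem

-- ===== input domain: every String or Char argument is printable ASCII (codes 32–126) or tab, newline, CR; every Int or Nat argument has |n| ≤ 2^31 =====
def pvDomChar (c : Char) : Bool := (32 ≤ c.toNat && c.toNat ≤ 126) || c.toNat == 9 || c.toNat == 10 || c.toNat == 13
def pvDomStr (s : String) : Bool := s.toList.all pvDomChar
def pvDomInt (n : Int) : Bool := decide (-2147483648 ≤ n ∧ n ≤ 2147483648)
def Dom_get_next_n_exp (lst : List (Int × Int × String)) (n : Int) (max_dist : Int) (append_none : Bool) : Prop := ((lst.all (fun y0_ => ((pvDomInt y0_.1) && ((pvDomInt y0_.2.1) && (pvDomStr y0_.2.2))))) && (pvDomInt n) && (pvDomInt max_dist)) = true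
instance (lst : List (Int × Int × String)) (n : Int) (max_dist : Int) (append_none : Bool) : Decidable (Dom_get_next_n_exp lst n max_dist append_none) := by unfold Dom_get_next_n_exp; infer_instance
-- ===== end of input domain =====

-- B replaces A's inner break-loop by a precomputed reverse run-length array of
-- within-distance gaps, so each row is a slice plus padding (alternative decomposition).

-- ===== PORT A =====
-- the inner 'for ind_next in range(1, n+1): … break' loop of A, as a recursion
def pvInnerA (lst : List (Int × Int × String)) (max_dist : Int) (append_none : Bool)
    (n l : Int) (ind_next : Int) : List (Option String) :=
  if h : ind_next ≤ n then
    let next_close := (PySem.List.pyGetD lst (l + ind_next - 1) (0, 0, "")).2.1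
    let next_far := (PySem.List.pyGetD lst (l + ind_next) (0, 0, "")).1
    if next_far - next_close ≤ max_dist then
      some (PySem.List.pyGetD lst (l + ind_next) (0, 0, "")).2.2 ::
        pvInnerA lst max_dist append_none n l (ind_next + 1)
    else if append_none then List.replicate (n - ind_next + 1).toNat none else []
  else []
termination_by (n + 1 - ind_next).toNat
decreasing_by omega

def get_next_n_exp (lst : List (Int × Int × String)) (n : Int) (max_dist : Int) (append_none : Bool) : List (String × List (List (Option String))) :=
  ((PySem.List.pyRange 0 ((lst.length : Int) - n) 1).foldl
    (fun dct l =>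
      let lab := (PySem.List.pyGetD lst l (0, 0, "")).2.2
      let dct := if dct.contains lab then dct else dct.insert lab []
      let temp := pvInnerA lst max_dist append_none n l 1
      if ((temp.length : Int) = n) then dct.insert lab (dct.getD lab [] ++ [temp]) else dct)
    (PySem.Dict.empty : PySem.Dict String (List (List (Option String))))).items

-- ===== PORT B =====
-- Source B's reverse loop building reach[·], as structural recursion on the list
def pvReach (lst : List (Int × Int × String)) (max_dist : Int) : List Nat :=
  match lst with
  | [] => []
  | [_] => [0]
  | a :: b :: rest =>
    let r := pvReach (b :: rest) max_dist
    (if b.1 - a.2.1 ≤ max_dist then r.headD 0 + 1 else 0) :: r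

def get_next_n_exp_alt (lst : List (Int × Int × String)) (n : Int) (max_dist : Int) (append_none : Bool) : List (String × List (List (Option String))) :=
  let reach := pvReach lst max_dist
  ((PySem.List.pyRange 0 ((lst.length : Int) - n) 1).foldl
    (fun dct l =>
      let lab := (PySem.List.pyGetD lst l (0, 0, "")).2.2
      let dct := dct.setdefault lab []
      let valid : Int := min ((PySem.List.pyGetD reach l 0 : Nat) : Int) n
      if valid = n || append_none then
        dct.insert lab (dct.getD lab [] ++
          [(PySem.List.pyRange 0 valid 1).map
              (fun j => some (PySem.List.pyGetD lst (l + 1 + j) (0, 0, "")).2.2) ++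
            List.replicate (n - valid).toNat none])
      else dct)
    (PySem.Dict.empty : PySem.Dict String (List (List (Option String))))).items

-- ===== PRECONDITION & SPEC =====
-- Pre_ excludes only n < 0, on which Python A always raises IndexError (range(len-n) runs past the list)
def Pre_get_next_n_exp (lst : List (Int × Int × String)) (n : Int) (max_dist : Int) (append_none : Bool) : Prop := 0 ≤ n
instance (lst : List (Int × Int × String)) (n : Int) (max_dist : Int) (append_none : Bool) : Decidable (Pre_get_next_n_exp lst n max_dist append_none) := by unfold Pre_get_next_n_exp; infer_instance

def pvWitness_get_next_n_exp : (List (Int × Int × String)) × Int × Int × Bool :=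
  ([(0, 1, "a"), (2, 3, "b"), (4, 5, "a")], 1, 2, true)

def Spec_get_next_n_exp (lst : List (Int × Int × String)) (n : Int) (max_dist : Int) (append_none : Bool) (out : List (String × List (List (Option String)))) : Prop := out = get_next_n_exp_alt lst n max_dist append_none
instance (lst : List (Int × Int × String)) (n : Int) (max_dist : Int) (append_none : Bool) (out : List (String × List (List (Option String)))) : Decidable (Spec_get_next_n_exp lst n max_dist append_none out) := by unfold Spec_get_next_n_exp; infer_instance

-- ===== CLAIM (what is proved, stated in full; the proofs are below) =====
def Claim_equal_get_next_n_exp : Prop := ∀ (lst : List (Int × Int × String)) (n : Int) (max_dist : Int) (append_none : Bool), Dom_get_next_n_exp lst n max_dist append_none → Pre_get_next_n_exp lst n max_dist append_none → Spec_get_next_n_exp lst n max_dist append_none (get_next_n_exp lst n max_dist append_none)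

-- ===== LEMMAS AND PROOFS =====

-- the run length of within-distance gaps starting at position i (proof-side spec)
def pvRun (lst : List (Int × Int × String)) (max_dist : Int) (i : Nat) : Nat :=
  if h : i + 1 < lst.length then
    (if lst[i + 1].1 - lst[i].2.1 ≤ max_dist then pvRun lst max_dist (i + 1) + 1 else 0)
  else 0
termination_by lst.length - i

theorem pvReach_length (lst : List (Int × Int × String)) (md : Int) :
    (pvReach lst md).length = lst.length := by
  induction lst with
  | nil => rfl
  | cons a t ih =>
    cases t with
    | nil => rfl
    | cons b rest => simp [pvReach] at ih ⊢; omega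

theorem pvRun_cons (a : Int × Int × String) (t : List (Int × Int × String)) (md : Int) :
    ∀ j, pvRun (a :: t) md (j + 1) = pvRun t md j := by
  have key : ∀ m j, t.length - j ≤ m → pvRun (a :: t) md (j + 1) = pvRun t md j := by
    intro m
    induction m with
    | zero =>
      intro j hj
      rw [pvRun]
      conv_rhs => rw [pvRun]
      have h1 : ¬ (j + 1 < t.length) := by omega
      have h2 : ¬ (j + 1 + 1 < (a :: t).length) := by simp; omega
      simp [h1]
    | succ m ih =>
      intro j hj
      rw [pvRun]
      conv_rhs => rw [pvRun]
      by_cases h : j + 1 < t.length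
      · have h2 : j + 1 + 1 < (a :: t).length := by simp; omega
        have e1 : (a :: t)[j + 1 + 1]'(by simpa using h2) = t[j + 1] := by simp
        have e2 : (a :: t)[j + 1]'(by simp; omega) = t[j] := by simp
        simp only [h, h2, dif_pos, e1, e2]
        rw [ih (j + 1) (by omega)]
      · have h2 : ¬ (j + 1 + 1 < (a :: t).length) := by simp; omega
        simp [h]
  exact fun j => key (t.length - j) j le_rfl

theorem pvReach_eq_run (lst : List (Int × Int × String)) (md : Int) (i : Nat)
    (hi : i < lst.length) : (pvReach lst md).getD i 0 = pvRun lst md i := by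
  induction lst generalizing i with
  | nil => simp at hi
  | cons a t ih =>
    cases t with
    | nil =>
      have h0 : i = 0 := by simpa using hi
      subst h0
      rw [pvRun]
      simp [pvReach]
    | cons b rest =>
      cases i with
      | zero =>
        have hlen : (pvReach (b :: rest) md).length = (b :: rest).length :=
          pvReach_length _ _
        have h0 : (pvReach (b :: rest) md).headD 0 = (pvReach (b :: rest) md).getD 0 0 := by
          cases hrr : pvReach (b :: rest) md with
          | nil => simp [hrr] at hlen
          | cons x xs => simp
        rw [pvRun]
        have hr1 : pvRun (a :: b :: rest) md 1 = pvRun (b :: rest) md 0 := pvRun_cons a _ md 0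
        simp only [pvReach, List.getD_cons_zero, List.length_cons]
        rw [h0, ih 0 (by simp), hr1]
        simp
      | succ j =>
        have := ih j (by simpa using hi)
        simp only [pvReach, List.getD_cons_succ]
        rw [this, pvRun_cons]

-- characterisation of A's inner loop via pvRun
theorem pvInnerA_eq (lst : List (Int × Int × String)) (md : Int) (an : Bool)
    (n l : Int) (hl : 0 ≤ l) (hL : l + n < (lst.length : Int)) :
    ∀ m (i : Int), 1 ≤ i → i ≤ n + 1 → (n + 1 - i).toNat ≤ m →
    pvInnerA lst md an n l i =
      (List.range (min (pvRun lst md (l + i - 1).toNat) (n - i + 1).toNat)).map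
          (fun (j : Nat) => some (PySem.List.pyGetD lst (l + i + (j : Int)) (0, 0, "")).2.2) ++
        (if min (pvRun lst md (l + i - 1).toNat) (n - i + 1).toNat = (n - i + 1).toNat then []
         else if an then
           List.replicate ((n - i + 1).toNat - min (pvRun lst md (l + i - 1).toNat) (n - i + 1).toNat) none
         else []) := by
  intro m
  induction m with
  | zero =>
    intro i h1 h2 h3
    have hi : ¬ (i ≤ n) := by omega
    rw [pvInnerA]
    have hz : (n - i + 1).toNat = 0 := by omega
    simp [hi, hz]
  | succ m ih =>
    intro i h1 h2 h3
    rw [pvInnerA]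
    by_cases hi : i ≤ n
    · -- index facts
      have hlt : l + i < (lst.length : Int) := by omega
      have hp1 : (l + i - 1).toNat + 1 = (l + i).toNat := by omega
      have hplen : (l + i - 1).toNat + 1 < lst.length := by omega
      have hn1 : (n - i + 1).toNat = (n - i).toNat + 1 := by omega
      -- the two pyGetD's are getElem's
      have hfar : PySem.List.pyGetD lst (l + i) (0, 0, "") = lst[(l + i).toNat]'(by omega) :=
        PySem.List.pyGetD_eq_getElem lst (0, 0, "") (by omega) (by omega)
      have hclose : PySem.List.pyGetD lst (l + i - 1) (0, 0, "") = lst[(l + i - 1).toNat]'(by omega) :=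
        PySem.List.pyGetD_eq_getElem lst (0, 0, "") (by omega) (by omega)
      have hidx : lst[(l + i - 1).toNat + 1]'hplen = lst[(l + i).toNat]'(by omega) := by
        congr 1
      have hrun : pvRun lst md (l + i - 1).toNat =
          if (lst[(l + i).toNat]'(by omega)).1 - (lst[(l + i - 1).toNat]'(by omega)).2.1 ≤ md then
            pvRun lst md (l + i).toNat + 1 else 0 := by
        rw [pvRun]
        rw [dif_pos hplen]
        simp only [hp1]
      by_cases hok : (lst[(l + i).toNat]'(by omega)).1 - (lst[(l + i - 1).toNat]'(by omega)).2.1 ≤ md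
      · -- gap ok: recurse
        have hIH := ih (i + 1) (by omega) (by omega) (by omega)
        have hp2 : (l + (i + 1) - 1).toNat = (l + i).toNat := by omega
        rw [hp2] at hIH
        set r := pvRun lst md (l + i).toNat with hr
        have hkmin : min (pvRun lst md (l + i - 1).toNat) (n - i + 1).toNat =
            min r (n - (i + 1) + 1).toNat + 1 := by
          rw [hrun, if_pos hok]
          omega
        rw [dif_pos hi, if_pos (by rw [hfar, hclose]; exact hok), hIH, hkmin]
        rw [List.range_succ_eq_map]
        simp only [List.map_cons, List.map_map, List.cons_append]
        congr 1
        · simp [hfar]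
        · congr 1
          · apply List.map_congr_left
            intro j _
            simp only [Function.comp_apply]
            congr 2
            push_cast
            ring
          · have he : (min r (n - (i + 1) + 1).toNat + 1 = (n - i + 1).toNat) ↔
                (min r (n - (i + 1) + 1).toNat = (n - (i + 1) + 1).toNat) := by omega
            by_cases hfull : min r (n - (i + 1) + 1).toNat = (n - (i + 1) + 1).toNat
            · rw [if_pos hfull, if_pos (he.mpr hfull)]
            · rw [if_neg hfull, if_neg (fun hc => hfull (he.mp hc))]
              cases an <;> simp
              omega
      · -- gap too far: break
        have hk0 : min (pvRun lst md (l + i - 1).toNat) (n - i + 1).toNat = 0 := by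
          rw [hrun, if_neg hok]; omega
        rw [dif_pos hi, if_neg (by rw [hfar, hclose]; exact hok), hk0]
        have hne : (0 : Nat) ≠ (n - i + 1).toNat := by omega
        simp [hne]
    · have hz : (n - i + 1).toNat = 0 := by omega
      simp [hi, hz]

-- ===== VERDICT (by name: the statement is the Claim_ definition above) =====
theorem get_next_n_exp_spec : Claim_equal_get_next_n_exp := by
  intro lst n md an _ hpre
  have hn : (0 : Int) ≤ n := hpre
  unfold Spec_get_next_n_exp get_next_n_exp get_next_n_exp_alt
  congr 1
  apply PySem.List.foldl_congr_mem
  intro dct l hmem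
  rw [PySem.List.mem_pyRange_one] at hmem
  obtain ⟨hl0, hlu⟩ := hmem
  have hlL : l < (lst.length : Int) := by omega
  dsimp only
  set lab := (PySem.List.pyGetD lst l (0, 0, "")).2.2 with hlab
  -- setdefault = A's membership test + insert
  have hsd : dct.setdefault lab ([] : List (List (Option String))) =
      if dct.contains lab then dct else dct.insert lab [] := by
    by_cases hc : dct.contains lab
    · rw [PySem.Dict.setdefault_of_contains _ _ hc, if_pos hc]
    · rw [PySem.Dict.setdefault_of_not_contains _ _ (by simpa using hc), if_neg hc]
  rw [hsd]
  set dct' := if dct.contains lab then dct else dct.insert lab [] with hdct'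
  -- A's inner loop
  have htemp := pvInnerA_eq lst md an n l hl0 (by omega) (n + 1 - 1).toNat 1
    (by omega) (by omega) (le_refl _)
  have e1 : l + 1 - 1 = l := by ring
  have e2 : n - 1 + 1 = n := by ring
  rw [e1, e2] at htemp
  rw [htemp]
  -- B's valid = the capped run length
  have hlt : l.toNat < lst.length := by omega
  have hreach : (PySem.List.pyGetD (pvReach lst md) l 0 : Nat) = pvRun lst md l.toNat := by
    rw [PySem.List.pyGetD_eq_getElem (pvReach lst md) 0 hl0
      (by rw [pvReach_length]; exact_mod_cast hlL)]
    rw [← List.getD_eq_getElem (pvReach lst md) 0 (by rw [pvReach_length]; exact hlt)]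
    exact pvReach_eq_run lst md l.toNat hlt
  have hvalid : min ((PySem.List.pyGetD (pvReach lst md) l 0 : Nat) : Int) n =
      ((min (pvRun lst md l.toNat) n.toNat : Nat) : Int) := by
    rw [hreach]; omega
  rw [hvalid]
  -- B's row = A's labels ++ padding
  have hrow : (PySem.List.pyRange 0 ((min (pvRun lst md l.toNat) n.toNat : Nat) : Int) 1).map
        (fun j => some (PySem.List.pyGetD lst (l + 1 + j) (0, 0, "")).2.2) ++
        List.replicate (n - ((min (pvRun lst md l.toNat) n.toNat : Nat) : Int)).toNat none =
      (List.range (min (pvRun lst md l.toNat) n.toNat)).map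
        (fun (j : Nat) => some (PySem.List.pyGetD lst (l + 1 + (j : Int)) (0, 0, "")).2.2) ++
        List.replicate (n.toNat - min (pvRun lst md l.toNat) n.toNat) none := by
    rw [PySem.List.pyRange_zero_nat, List.map_map]
    congr 2
    omega
  rw [hrow]
  have hKn : min (pvRun lst md l.toNat) n.toNat ≤ n.toNat := min_le_right _ _
  by_cases hfull : min (pvRun lst md l.toNat) n.toNat = n.toNat
  · have h0 : n.toNat - min (pvRun lst md l.toNat) n.toNat = 0 := by omega
    have hc2 : (decide (((min (pvRun lst md l.toNat) n.toNat : Nat) : Int) = n) || an) = true := by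
      simp only [hfull]
      simp
      omega
    rw [if_pos hfull, h0, hc2, if_pos rfl]
    have hc1 : ((((List.range (min (pvRun lst md l.toNat) n.toNat)).map
        (fun (j : Nat) => some (PySem.List.pyGetD lst (l + 1 + (j : Int)) (0, 0, "")).2.2) ++
        ([] : List (Option String))).length : Int)) = n := by
      simp [hfull]
      omega
    rw [if_pos hc1]
    simp
  · rw [if_neg hfull]
    cases an with
    | true =>
      have hc1 : ((((List.range (min (pvRun lst md l.toNat) n.toNat)).map
          (fun (j : Nat) => some (PySem.List.pyGetD lst (l + 1 + (j : Int)) (0, 0, "")).2.2) ++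
          (if true then List.replicate (n.toNat - min (pvRun lst md l.toNat) n.toNat) none
           else [])).length : Int)) = n := by
        simp
        omega
      rw [if_pos hc1, if_pos (by simp)]
      simp
    | false =>
      have hc1 : ¬ ((((List.range (min (pvRun lst md l.toNat) n.toNat)).map
          (fun (j : Nat) => some (PySem.List.pyGetD lst (l + 1 + (j : Int)) (0, 0, "")).2.2) ++
          (if false then List.replicate (n.toNat - min (pvRun lst md l.toNat) n.toNat) none
           else [])).length : Int)) = n := by
        simp
        omega
      rw [if_neg hc1, if_neg (by simp; omega)]
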